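-- pv_equiv track=rewrite | github.com/jacobporter6/leetcode | algorithms/house_robber.py | get_sums
-- ===== SOURCE A (Python) =====
-- def get_sums(
--     houses: list[int], value: int = 0, combinations: list[int] | None = None
-- ) -> list[int]:
--     combinations = combinations or []
--
--     if houses:
--         for idx, x in enumerate(houses[: len(houses) // 2 + 1]):
--             return get_sums(houses[idx + 2 :], value + x, combinations)
--
--     else:
--         combinations.append(value)
--
--     return combinations
-- ===== SOURCE B (Python) =====
-- def get_sums(
--     houses: list[int], value: int = 0, combinations: list[int] | None = None
-- ) -> list[int]:
--     result = combinations or []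
--     total = value
--     i = 0
--     while houses and i < len(houses):
--         total += houses[i]
--         i += 2
--     result.append(total)
--     return result
-- ===== Notes on version B (the rewrite author's own statement) =====
-- stated objective: simpler
-- what changed: Replaces A's tail recursion over houses[idx+2:] slices (driven by an enumerate loop that always returns on its first iteration) with a single iterative index loop stepping by 2 accumulating the total directly.
import Mathlib
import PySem

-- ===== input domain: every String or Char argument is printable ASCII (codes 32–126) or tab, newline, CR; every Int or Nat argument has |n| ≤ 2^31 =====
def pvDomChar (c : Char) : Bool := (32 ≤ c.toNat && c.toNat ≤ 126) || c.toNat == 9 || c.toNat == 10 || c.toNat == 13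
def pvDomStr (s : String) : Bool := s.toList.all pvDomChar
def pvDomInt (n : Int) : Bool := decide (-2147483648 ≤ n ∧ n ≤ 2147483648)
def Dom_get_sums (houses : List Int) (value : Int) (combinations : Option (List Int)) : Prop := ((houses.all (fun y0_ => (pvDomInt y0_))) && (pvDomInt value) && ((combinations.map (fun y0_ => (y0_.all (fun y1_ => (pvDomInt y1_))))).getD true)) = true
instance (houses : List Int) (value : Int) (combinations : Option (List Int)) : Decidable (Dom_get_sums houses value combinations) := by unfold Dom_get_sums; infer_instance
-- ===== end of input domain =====

-- B replaces A's tail recursion over houses[idx+2:] slices with one iterative index loop (step 2); equal return values, and both append to a truthy `combinations` in place.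


-- ===== PORT A =====
-- `combinations = combinations or []`: None or [] become a fresh []; equal as a value to getD [].
-- The enumerate loop over houses[:len//2+1] always `return`s on its first iteration (idx = 0,
-- x = houses[0]) whenever houses is nonempty, so it is one recursive call on houses[2:].
def get_sums (houses : List Int) (value : Int) (combinations : Option (List Int)) : List Int :=
  match houses with
  | [] => (combinations.getD []) ++ [value]          -- combinations.append(value); return combinations
  | x :: rest => get_sums (rest.drop 1) (value + x) (some (combinations.getD []))
termination_by houses.length
decreasing_by simp

-- ===== PORT B =====
-- the while loop: total += houses[i]; i += 2, starting at i = 0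
def get_sums_alt_loop (houses : List Int) (i : Nat) : Int :=
  if h : houses ≠ [] ∧ i < houses.length then houses[i] + get_sums_alt_loop houses (i + 2) else 0
termination_by houses.length - i
decreasing_by omega

def get_sums_alt (houses : List Int) (value : Int) (combinations : Option (List Int)) : List Int :=
  let result := combinations.getD []
  let total := value + get_sums_alt_loop houses 0
  result ++ [total]                                   -- result.append(total); return result

-- ===== PRECONDITION & SPEC =====
def Spec_get_sums (houses : List Int) (value : Int) (combinations : Option (List Int)) (out : List Int) : Prop := out = get_sums_alt houses value combinations
instance (houses : List Int) (value : Int) (combinations : Option (List Int)) (out : List Int) : Decidable (Spec_get_sums houses value combinations out) := by unfold Spec_get_sums; infer_instance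

-- ===== CLAIM (what is proved, stated in full; the proofs are below) =====
def Claim_equal_get_sums : Prop := ∀ (houses : List Int) (value : Int) (combinations : Option (List Int)), Dom_get_sums houses value combinations → Spec_get_sums houses value combinations (get_sums houses value combinations)

-- ===== LEMMAS AND PROOFS =====

theorem get_sums_alt_loop_shift (a : Int) (l : List Int) (i : Nat) :
    get_sums_alt_loop (a :: l) (i + 1) = get_sums_alt_loop l i := by
  fun_induction get_sums_alt_loop l i with
  | case1 i h ih =>
      rw [get_sums_alt_loop]
      simp only [List.length_cons]
      rw [dif_pos ⟨by simp, by omega⟩]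
      have : get_sums_alt_loop (a :: l) (i + 2 + 1) = get_sums_alt_loop l (i + 2) := ih
      simp only [show i + 1 + 2 = i + 2 + 1 by omega, this]
      simp
  | case2 i h =>
      rw [get_sums_alt_loop, dif_neg]
      rintro ⟨-, h2⟩
      simp only [List.length_cons] at h2
      rcases not_and_or.mp h with h | h
      · rw [not_ne_iff] at h; subst h; simp at h2
      · omega

theorem get_sums_alt_loop_cons (x : Int) (rest : List Int) :
    get_sums_alt_loop (x :: rest) 0 = x + get_sums_alt_loop (rest.drop 1) 0 := by
  rw [get_sums_alt_loop, dif_pos ⟨by simp, by simp⟩]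
  simp only [List.getElem_cons_zero]
  congr 1
  rw [show (2 : Nat) = 1 + 1 from rfl, get_sums_alt_loop_shift]
  cases rest with
  | nil => simp [get_sums_alt_loop]
  | cons y t =>
      rw [show (1 : Nat) = 0 + 1 from rfl, get_sums_alt_loop_shift]
      rfl

theorem get_sums_eq_aux (n : Nat) : ∀ (houses : List Int), houses.length ≤ n →
    ∀ (value : Int) (combinations : Option (List Int)),
    get_sums houses value combinations = (combinations.getD []) ++ [value + get_sums_alt_loop houses 0] := by
  induction n with
  | zero =>
      intro houses hlen value combinations
      have : houses = [] := List.eq_nil_of_length_eq_zero (Nat.le_zero.mp hlen)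
      subst this
      rw [get_sums, get_sums_alt_loop]
      simp
  | succ n ih =>
      intro houses hlen value combinations
      match houses with
      | [] =>
          rw [get_sums, get_sums_alt_loop]
          simp
      | x :: rest =>
          rw [get_sums, ih (rest.drop 1) (by simp at hlen ⊢; omega), get_sums_alt_loop_cons]
          simp [add_assoc]

theorem get_sums_eq (houses : List Int) (value : Int) (combinations : Option (List Int)) :
    get_sums houses value combinations = (combinations.getD []) ++ [value + get_sums_alt_loop houses 0] :=
  get_sums_eq_aux houses.length houses (le_refl _) value combinations

-- ===== VERDICT (by name: the statement is the Claim_ definition above) =====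
theorem get_sums_spec : Claim_equal_get_sums := by
  intro houses value combinations _
  unfold Spec_get_sums get_sums_alt
  exact get_sums_eq houses value combinations
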